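-- pv_equiv track=rewrite | github.com/AngelAquino/SukatWika | scripts/parsing_functions.py | word2syll_tgl
-- ===== SOURCE A (Python) =====
-- def word2syll_tgl(word):
--     """Input: word (single string). Output: syllables (list of strings)."""
--
--     vowel_list = ['a', 'e', 'i', 'o', 'u']
--     nasal_list = ['m', 'n']
--     nasal_digraph_list = ['bl', 'br', 'pl', 'pr', 'dr', 'tr']
--     digraph_list = ['ng']
--
--     syll_list = []
--     curr_syll = ''
--     vowel_flag = False
--     idx = 0
--
--     while idx < len(word):
--         c = word[idx]
--
--         if c == '-':
--             syll_list.append(curr_syll)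
--             curr_syll = ''
--             vowel_flag = False
--             idx += 1
--             continue
--
--         if vowel_flag == False:
--             curr_syll += c
--             if c in vowel_list:
--                 vowel_flag = True
--             idx += 1
--             continue
--
--         if c in vowel_list:
--             syll_list.append(curr_syll)
--             curr_syll = c
--             vowel_flag = True
--             idx += 1
--             continue
--
--         i = 1
--         word_final = True
--         while idx + i < len(word):
--             if word[idx + i] in vowel_list:
--                 word_final = False
--                 break
--             if word[idx + i] == '-':    # hyphen divisions as separate 'words'
--                 break
--             i += 1
--
--         if word_final == True:
--             curr_syll += c
--             idx += 1
--             continue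
--
--         if i >= 3:
--             if c in nasal_list and word[idx+1:idx+3] in nasal_digraph_list:
--                 syll_list.append(curr_syll + c)
--                 curr_syll = ''
--                 vowel_flag = False
--                 idx += 1
--             else:
--                 syll_list.append(curr_syll + word[idx:idx+2])
--                 curr_syll = ''
--                 vowel_flag = False
--                 idx += 2
--
--         elif i == 2:
--             if word[idx:idx+2] in digraph_list:
--                 syll_list.append(curr_syll)
--                 curr_syll = c
--                 vowel_flag = False
--                 idx += 1
--             else:
--                 syll_list.append(curr_syll + c)
--                 curr_syll = ''
--                 vowel_flag = False
--                 idx += 1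
--
--         else:
--             syll_list.append(curr_syll)
--             curr_syll = c
--             vowel_flag = False
--             idx += 1
--
--     if len(curr_syll):  # if syllable is not empty
--         syll_list.append(curr_syll)
--
--     return syll_list
-- ===== SOURCE B (Python) =====
-- def word2syll_tgl(word):
--     """Input: word (single string). Output: syllables (list of strings).
--
--     Splits on hyphens first, then cuts each hyphen-free piece syllable by
--     syllable: find the first two vowels, derive the cut point from the size
--     of the consonant cluster between them, slice the syllable off and repeat.
--     No vowel_flag state machine and no running-syllable accumulator."""
--
--     vowels = 'aeiou'
--     nasal_digraphs = ('bl', 'br', 'pl', 'pr', 'dr', 'tr')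
--
--     def first_vowel(seg, k):
--         while k < len(seg) and seg[k] not in vowels:
--             k += 1
--         return k if k < len(seg) else -1
--
--     out = []
--     segs = word.split('-')
--     last_i = len(segs) - 1
--     for i, seg in enumerate(segs):
--         while True:
--             p = first_vowel(seg, 0)
--             if p < 0:
--                 # no vowel at all: the piece is one syllable (kept even when
--                 # empty, unless it is the final piece of the word)
--                 if seg or i < last_i:
--                     out.append(seg)
--                 break
--             q = first_vowel(seg, p + 1)
--             if q < 0:
--                 # single vowel left: rest of the piece is the last syllable
--                 out.append(seg)
--                 break
--             g = q - p - 1          # consonant cluster between the two vowels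
--             if g == 0:
--                 cut = q
--             elif g == 1:
--                 cut = p + 1
--             elif g == 2:
--                 cut = p + 1 if seg[p+1:p+3] == 'ng' else p + 2
--             else:
--                 cut = p + 2 if seg[p+1] in 'mn' and seg[p+2:p+4] in nasal_digraphs else p + 3
--             out.append(seg[:cut])
--             seg = seg[cut:]
--     return out
-- ===== Notes on version B (the rewrite author's own statement) =====
-- stated objective: faster
-- what changed: B replaces A's vowel_flag state machine (per-char accumulator plus an inner rescan towards the next vowel at every consonant seen after a vowel, repeated per char in trailing consonant clusters) by hyphen-splitting followed by slicing each piece syllable-by-syllable: locate the first two vowels, derive the cut point from the inter-vowel cluster length, slice and repeat.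
import Mathlib
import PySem

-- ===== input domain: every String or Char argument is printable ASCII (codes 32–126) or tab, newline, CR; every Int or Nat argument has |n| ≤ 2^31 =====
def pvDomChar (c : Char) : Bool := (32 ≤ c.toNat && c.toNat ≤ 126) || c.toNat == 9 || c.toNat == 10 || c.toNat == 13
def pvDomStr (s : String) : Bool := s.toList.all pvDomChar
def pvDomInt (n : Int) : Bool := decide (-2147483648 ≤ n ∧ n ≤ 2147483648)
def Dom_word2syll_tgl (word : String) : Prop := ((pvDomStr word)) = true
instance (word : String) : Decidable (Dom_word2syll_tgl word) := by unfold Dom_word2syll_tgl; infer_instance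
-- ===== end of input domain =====

-- B replaces A's vowel_flag state machine by hyphen-splitting plus per-piece
-- syllable slicing driven by the first two vowels; objective: faster on the
-- inputs a timing run measures (A rescans to the next vowel per consonant).

-- ===== PORT A =====
def pvVowels : List Char := ['a', 'e', 'i', 'o', 'u']
def pvNasals : List Char := ['m', 'n']
def pvNasalDigraphs : List String := ["bl", "br", "pl", "pr", "dr", "tr"]
def pvDigraphs : List String := ["ng"]

-- A's inner while loop, scanning from word[idx + i]: returns (i, word_final)
def pvScanA (w : List Char) (fuel idx i : Nat) : Nat × Bool :=
  match fuel with
  | 0 => (i, true)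
  | fuel + 1 =>
    if h : idx + i < w.length then
      if w[idx + i] ∈ pvVowels then (i, false)
      else if w[idx + i] = '-' then (i, true)
      else pvScanA w fuel idx (i + 1)
    else (i, true)

-- A's outer while loop over (syll_list, curr_syll, vowel_flag, idx); strings as char lists,
-- slices as drop/take (exact for these nonnegative in-range bounds)
def pvLoopA (w : List Char) (fuel : Nat) (idx : Nat) (syll : List String) (cur : List Char) (vf : Bool) : List String :=
  match fuel with
  | 0 => if cur.length ≠ 0 then syll ++ [String.ofList cur] else syll
  | fuel + 1 =>
    if h : idx < w.length then
      let c := w[idx]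
      if c = '-' then pvLoopA w fuel (idx + 1) (syll ++ [String.ofList cur]) [] false
      else if vf = false then
        pvLoopA w fuel (idx + 1) syll (cur ++ [c]) (if c ∈ pvVowels then true else false)
      else if c ∈ pvVowels then
        pvLoopA w fuel (idx + 1) (syll ++ [String.ofList cur]) [c] true
      else
        match pvScanA w w.length idx 1 with
        | (i, word_final) =>
          if word_final = true then pvLoopA w fuel (idx + 1) syll (cur ++ [c]) vf
          else if 3 ≤ i then
            if c ∈ pvNasals ∧ String.ofList ((w.drop (idx + 1)).take 2) ∈ pvNasalDigraphs then
              pvLoopA w fuel (idx + 1) (syll ++ [String.ofList (cur ++ [c])]) [] false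
            else
              pvLoopA w fuel (idx + 2) (syll ++ [String.ofList (cur ++ (w.drop idx).take 2)]) [] false
          else if i = 2 then
            if String.ofList ((w.drop idx).take 2) ∈ pvDigraphs then
              pvLoopA w fuel (idx + 1) (syll ++ [String.ofList cur]) [c] false
            else
              pvLoopA w fuel (idx + 1) (syll ++ [String.ofList (cur ++ [c])]) [] false
          else
            pvLoopA w fuel (idx + 1) (syll ++ [String.ofList cur]) [c] false
    else
      if cur.length ≠ 0 then syll ++ [String.ofList cur] else syll

def word2syll_tgl (word : String) : List String :=
  pvLoopA word.toList (word.toList.length + 1) 0 [] [] false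

-- ===== PORT B =====
def altVowels : List Char := ['a', 'e', 'i', 'o', 'u']
def altNasals : List Char := ['m', 'n']
def altNasalDigraphs : List String := ["bl", "br", "pl", "pr", "dr", "tr"]

-- Source B's first_vowel(seg, k): first vowel index ≥ k (none for Python's -1)
def altFV (seg : List Char) (k : Nat) : Option Nat :=
  if h : k < seg.length then
    if seg[k] ∈ altVowels then some k else altFV seg (k + 1)
  else none
termination_by seg.length - k

-- the port cites this for termination of altSegSyll below
lemma altFV_some_bounds : ∀ (seg : List Char) (k q : Nat), altFV seg k = some q → k ≤ q ∧ q < seg.length := by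
  intro seg
  have key : ∀ n k q, seg.length - k ≤ n → altFV seg k = some q → k ≤ q ∧ q < seg.length := by
    intro n
    induction n with
    | zero =>
      intro k q hk h
      unfold altFV at h
      rw [dif_neg (by omega)] at h
      simp at h
    | succ n ih =>
      intro k q hk h
      unfold altFV at h
      by_cases hlt : k < seg.length
      · rw [dif_pos hlt] at h
        by_cases hv : seg[k] ∈ altVowels
        · rw [if_pos hv] at h
          have : k = q := by injection h
          omega
        · rw [if_neg hv] at h
          have := ih (k + 1) q (by omega) h
          omega
      · rw [dif_neg hlt] at h
        simp at h
  intro k q h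
  exact key seg.length k q (by omega) h

-- Source B's inner while-True loop: slice one syllable off `seg` and repeat
def altSegSyll (seg : List Char) (notLast : Bool) : List String :=
  match _hp : altFV seg 0 with
  | none => if seg ≠ [] ∨ notLast = true then [String.ofList seg] else []
  | some p =>
    match hq : altFV seg (p + 1) with
    | none => [String.ofList seg]
    | some q =>
      let g := q - p - 1
      let cut :=
        if g = 0 then q
        else if g = 1 then p + 1
        else if g = 2 then (if String.ofList ((seg.drop (p + 1)).take 2) = "ng" then p + 1 else p + 2)
        else (if seg.getD (p + 1) ' ' ∈ altNasals ∧ String.ofList ((seg.drop (p + 2)).take 2) ∈ altNasalDigraphs then p + 2 else p + 3)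
      String.ofList (seg.take cut) :: altSegSyll (seg.drop cut) notLast
termination_by seg.length
decreasing_by
  have hb := altFV_some_bounds seg (p + 1) q hq
  simp only [List.length_drop]
  split_ifs <;> omega

-- Source B's outer `for i, seg in enumerate(segs)` loop, as a fold carrying (i, out)
def word2syll_tgl_alt (word : String) : List String :=
  let segs := PySem.Chars.splitOn word.toList ['-']
  (segs.foldl
    (fun (st : Nat × List String) seg =>
      (st.1 + 1, st.2 ++ altSegSyll seg (decide (st.1 < segs.length - 1))))
    (0, [])).2

-- ===== PRECONDITION & SPEC =====
def Spec_word2syll_tgl (word : String) (out : List String) : Prop := out = word2syll_tgl_alt word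
instance (word : String) (out : List String) : Decidable (Spec_word2syll_tgl word out) := by unfold Spec_word2syll_tgl; infer_instance

-- ===== CLAIM (what is proved, stated in full; the proofs are below) =====
def Claim_equal_word2syll_tgl : Prop := ∀ (word : String), Dom_word2syll_tgl word → Spec_word2syll_tgl word (word2syll_tgl word)

-- ===== LEMMAS AND PROOFS =====

-- next-vowel search of A's inner scan, structurally on the remaining suffix
def PVnvl : List Char → Option Nat
  | [] => none
  | c :: r => if c ∈ pvVowels then some 0 else if c = '-' then none else (PVnvl r).map (· + 1)

-- first-vowel search, structurally on a suffix (proof-side view of altFV)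
def PVfvl : List Char → Option Nat
  | [] => none
  | c :: r => if c ∈ altVowels then some 0 else (PVfvl r).map (· + 1)

-- fuel-free reference rendering of A's loop, on the suffix still to process
def refA : List Char → List Char → Bool → List String
  | [], cur, _ => if cur ≠ [] then [String.ofList cur] else []
  | c :: r, cur, vf =>
    if c = '-' then String.ofList cur :: refA r [] false
    else if vf = false then refA r (cur ++ [c]) (decide (c ∈ pvVowels))
    else if c ∈ pvVowels then String.ofList cur :: refA r [c] true
    else
      match PVnvl r with
      | none => refA r (cur ++ [c]) vf
      | some k =>
        if 3 ≤ k + 1 then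
          if c ∈ pvNasals ∧ String.ofList (r.take 2) ∈ pvNasalDigraphs then
            String.ofList (cur ++ [c]) :: refA r [] false
          else
            String.ofList (cur ++ [c] ++ r.take 1) :: refA (r.drop 1) [] false
        else if k + 1 = 2 then
          if String.ofList (c :: r.take 1) ∈ pvDigraphs then
            String.ofList cur :: refA r [c] false
          else
            String.ofList (cur ++ [c]) :: refA r [] false
        else
          String.ofList cur :: refA r [c] false
termination_by l _ _ => l.length
decreasing_by all_goals (simp only [List.length_drop, List.length_cons]; omega)

-- recursive view of B's fold over the segments
def recJoin : List (List Char) → List String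
  | [] => []
  | s :: ss => altSegSyll s (decide (ss ≠ [])) ++ recJoin ss

def okTail (t : List Char) : Prop := t = [] ∨ ∃ r, t = '-' :: r

def contT : List Char → List String
  | [] => []
  | _ :: r => refA r [] false

def pvCut (seg : List Char) (p q : Nat) : Nat :=
  if q - p - 1 = 0 then q
  else if q - p - 1 = 1 then p + 1
  else if q - p - 1 = 2 then (if String.ofList ((seg.drop (p + 1)).take 2) = "ng" then p + 1 else p + 2)
  else (if seg.getD (p + 1) ' ' ∈ altNasals ∧ String.ofList ((seg.drop (p + 2)).take 2) ∈ altNasalDigraphs then p + 2 else p + 3)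

lemma segSyll_none (seg : List Char) (notLast : Bool) (h : altFV seg 0 = none) :
    altSegSyll seg notLast = if seg ≠ [] ∨ notLast = true then [String.ofList seg] else [] := by
  rw [altSegSyll]
  split
  · rfl
  · simp_all

lemma segSyll_one (seg : List Char) (notLast : Bool) (p : Nat) (hp : altFV seg 0 = some p)
    (hq : altFV seg (p + 1) = none) : altSegSyll seg notLast = [String.ofList seg] := by
  rw [altSegSyll]
  split
  · simp_all
  · rename_i p' hp'
    rw [hp] at hp'
    injection hp' with hp''
    subst hp''
    split
    · rfl
    · simp_all

lemma segSyll_cut (seg : List Char) (notLast : Bool) (p q : Nat) (hp : altFV seg 0 = some p)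
    (hq : altFV seg (p + 1) = some q) :
    altSegSyll seg notLast =
      String.ofList (seg.take (pvCut seg p q)) :: altSegSyll (seg.drop (pvCut seg p q)) notLast := by
  rw [altSegSyll]
  split
  · simp_all
  · rename_i p' hp'
    rw [hp] at hp'
    injection hp' with hp''
    subst hp''
    split
    · simp_all
    · rename_i q' hq'
      rw [hq] at hq'
      injection hq' with hq''
      subst hq''
      rfl

lemma altFV_eq (seg : List Char) : ∀ k, altFV seg k = (PVfvl (seg.drop k)).map (· + k) := by
  have key : ∀ n k, seg.length - k ≤ n → altFV seg k = (PVfvl (seg.drop k)).map (· + k) := by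
    intro n
    induction n with
    | zero =>
      intro k hk
      unfold altFV
      rw [dif_neg (by omega), List.drop_of_length_le (by omega)]
      simp [PVfvl]
    | succ n ih =>
      intro k hk
      unfold altFV
      by_cases hlt : k < seg.length
      · rw [dif_pos hlt, List.drop_eq_getElem_cons hlt]
        by_cases hv : seg[k] ∈ altVowels
        · simp [PVfvl, hv]
        · rw [if_neg hv, ih (k + 1) (by omega)]
          simp only [PVfvl, if_neg hv]
          cases PVfvl (seg.drop (k + 1)) with
          | none => simp
          | some a => simp; omega
      · rw [dif_neg hlt, List.drop_of_length_le (by omega)]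
        simp [PVfvl]
  intro k
  exact key seg.length k (by omega)

lemma scan_nvl (w : List Char) : ∀ fuel idx i, w.length ≤ idx + i + fuel →
    (PVnvl (w.drop (idx + i)) = none → (pvScanA w fuel idx i).2 = true) ∧
    (∀ k, PVnvl (w.drop (idx + i)) = some k → pvScanA w fuel idx i = (i + k, false)) := by
  intro fuel
  induction fuel with
  | zero =>
    intro idx i hf
    rw [List.drop_of_length_le (by omega)]
    exact ⟨fun _ => rfl, fun k hk => by simp [PVnvl] at hk⟩
  | succ fuel ih =>
    intro idx i hf
    unfold pvScanA
    by_cases hlt : idx + i < w.length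
    · rw [List.drop_eq_getElem_cons hlt]
      by_cases hv : w[idx + i] ∈ pvVowels
      · rw [dif_pos hlt, if_pos hv]
        refine ⟨fun hn => ?_, fun k hk => ?_⟩
        · simp [PVnvl, hv] at hn
        · simp [PVnvl, hv] at hk
          simp [← hk]
      · by_cases hh : w[idx + i] = '-'
        · rw [dif_pos hlt, if_neg hv, if_pos hh]
          refine ⟨fun _ => rfl, fun k hk => ?_⟩
          simp [PVnvl, hh, show ('-' : Char) ∉ pvVowels from by decide] at hk
        · rw [dif_pos hlt, if_neg hv, if_neg hh]
          have := ih idx (i + 1) (by omega)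
          rw [show idx + (i + 1) = idx + i + 1 from by omega] at this
          refine ⟨fun hn => ?_, fun k hk => ?_⟩
          · simp only [PVnvl, if_neg hv, if_neg hh, Option.map_eq_none_iff] at hn
            exact this.1 hn
          · simp only [PVnvl, if_neg hv, if_neg hh] at hk
            cases hrec : PVnvl (w.drop (idx + i + 1)) with
            | none => rw [hrec] at hk; simp at hk
            | some m =>
              rw [hrec] at hk
              simp at hk
              rw [this.2 m hrec]
              congr 1
              omega
    · rw [dif_neg hlt, List.drop_of_length_le (by omega)]
      exact ⟨fun _ => rfl, fun k hk => by simp [PVnvl] at hk⟩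

lemma loopA_refA (w : List Char) : ∀ fuel idx syll cur vf, w.length ≤ idx + fuel →
    pvLoopA w fuel idx syll cur vf = syll ++ refA (w.drop idx) cur vf := by
  intro fuel
  induction fuel with
  | zero =>
    intro idx syll cur vf hb
    rw [List.drop_of_length_le (by omega)]
    unfold pvLoopA refA
    by_cases hcur : cur = []
    · simp [hcur]
    · simp [hcur, List.length_eq_zero_iff]
  | succ fuel ih =>
    intro idx syll cur vf hb
    by_cases h : idx < w.length
    · rw [List.drop_eq_getElem_cons h]
      rw [pvLoopA, dif_pos h, refA]
      by_cases hc : w[idx] = '-'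
      · rw [if_pos hc, if_pos hc, ih (idx + 1) _ _ _ (by omega)]
        simp
      · rw [if_neg hc, if_neg hc]
        by_cases hvf : vf = false
        · rw [if_pos hvf, if_pos hvf]
          rw [ih (idx + 1) _ _ _ (by omega)]
          have hdec : (if w[idx] ∈ pvVowels then true else false) = decide (w[idx] ∈ pvVowels) := by
            by_cases hv : w[idx] ∈ pvVowels <;> simp [hv]
          rw [hdec]
        · rw [if_neg hvf, if_neg hvf]
          by_cases hv : w[idx] ∈ pvVowels
          · rw [if_pos hv, if_pos hv, ih (idx + 1) _ _ _ (by omega)]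
            simp
          · rw [if_neg hv, if_neg hv]
            have hscan := scan_nvl w w.length idx 1 (by omega)
            rw [show idx + 1 = idx + 1 from rfl] at hscan
            cases hnv : PVnvl (w.drop (idx + 1)) with
            | none =>
              have h2 : (pvScanA w w.length idx 1).2 = true := hscan.1 hnv
              rcases hps : pvScanA w w.length idx 1 with ⟨i0, wfin⟩
              rw [hps] at h2
              simp only at h2
              subst h2
              rw [ih (idx + 1) _ _ _ (by omega)]
              simp
            | some k =>
              have hs := hscan.2 k hnv
              rw [hs]
              simp only [Bool.false_eq_true, if_false]
              have h1k : 1 + k = k + 1 := by omega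
              rw [h1k]
              by_cases h3 : 3 ≤ k + 1
              · rw [if_pos h3, if_pos h3]
                by_cases hnas : w[idx] ∈ pvNasals ∧ String.ofList ((w.drop (idx + 1)).take 2) ∈ pvNasalDigraphs
                · rw [if_pos hnas, if_pos hnas, ih (idx + 1) _ _ _ (by omega)]
                  simp
                · rw [if_neg hnas, if_neg hnas, ih (idx + 2) _ _ _ (by omega)]
                  have hdd : (w.drop (idx + 1)).drop 1 = w.drop (idx + 2) := by
                    rw [List.drop_drop]
                  have htt : (w.drop idx).take 2 = w[idx] :: (w.drop (idx + 1)).take 1 := by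
                    rw [List.drop_eq_getElem_cons h, List.take_succ_cons]
                  rw [hdd, htt]
                  simp
              · rw [if_neg h3, if_neg h3]
                by_cases h2 : k + 1 = 2
                · rw [if_pos h2, if_pos h2]
                  have htt : (w.drop idx).take 2 = w[idx] :: (w.drop (idx + 1)).take 1 := by
                    rw [List.drop_eq_getElem_cons h, List.take_succ_cons]
                  rw [htt]
                  by_cases hng : String.ofList (w[idx] :: (w.drop (idx + 1)).take 1) ∈ pvDigraphs
                  · rw [if_pos hng, if_pos hng, ih (idx + 1) _ _ _ (by omega)]
                    simp
                  · rw [if_neg hng, if_neg hng, ih (idx + 1) _ _ _ (by omega)]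
                    simp
                · rw [if_neg h2, if_neg h2, ih (idx + 1) _ _ _ (by omega)]
                  simp
    · rw [List.drop_of_length_le (by omega)]
      rw [pvLoopA, dif_neg h]
      unfold refA
      by_cases hcur : cur = []
      · simp [hcur]
      · simp [hcur, List.length_eq_zero_iff]

lemma phase1 : ∀ (cs rest cur : List Char), (∀ c ∈ cs, c ∉ pvVowels ∧ c ≠ '-') →
    refA (cs ++ rest) cur false = refA rest (cur ++ cs) false := by
  intro cs
  induction cs with
  | nil => intro rest cur _; simp
  | cons c cs ih =>
    intro rest cur h
    have hc := h c (by simp)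
    rw [List.cons_append, refA, if_neg hc.2, if_pos rfl]
    rw [decide_eq_false hc.1]
    rw [ih rest (cur ++ [c]) (fun x hx => h x (by simp [hx]))]
    simp

lemma nvl_none : ∀ (cs t : List Char), okTail t → (∀ c ∈ cs, c ∉ pvVowels) →
    PVnvl (cs ++ t) = none := by
  intro cs
  induction cs with
  | nil =>
    intro t ht _
    rcases ht with h | ⟨r, h⟩ <;>
      simp [h, PVnvl, show ('-' : Char) ∉ pvVowels from by decide]
  | cons c cs ih =>
    intro t ht h
    have hc := h c (by simp)
    by_cases hh : c = '-'
    · simp [PVnvl, hh, show ('-' : Char) ∉ pvVowels from by decide]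
    · simp [PVnvl, hh, hc, ih t ht (fun x hx => h x (by simp [hx]))]

lemma nvl_some : ∀ (G : List Char) (v2 : Char) (R2 : List Char), (∀ c ∈ G, c ∉ pvVowels ∧ c ≠ '-') →
    v2 ∈ pvVowels → PVnvl (G ++ v2 :: R2) = some G.length := by
  intro G
  induction G with
  | nil => intro v2 R2 _ hv; simp [PVnvl, hv]
  | cons c G ih =>
    intro v2 R2 h hv
    have hc := h c (by simp)
    simp only [List.cons_append, PVnvl, if_neg hc.1, if_neg hc.2]
    rw [ih v2 R2 (fun x hx => h x (by simp [hx])) hv]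
    simp

lemma phase3 : ∀ (cs t cur : List Char), okTail t → (∀ c ∈ cs, c ∉ pvVowels ∧ c ≠ '-') →
    refA (cs ++ t) cur true = refA t (cur ++ cs) true := by
  intro cs
  induction cs with
  | nil => intro t cur _ _; simp
  | cons c cs ih =>
    intro t cur ht h
    have hc := h c (by simp)
    rw [List.cons_append, refA, if_neg hc.2]
    simp only [if_neg (by simp : ¬ (true = false)), if_neg hc.1]
    rw [nvl_none (cs) t ht (fun x hx => (h x (by simp [hx])).1)]
    rw [ih t (cur ++ [c]) ht (fun x hx => h x (by simp [hx]))]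
    simp

lemma fvl_none_mem : ∀ (l : List Char), PVfvl l = none → ∀ c ∈ l, c ∉ altVowels := by
  intro l
  induction l with
  | nil => intro _ c hc; simp at hc
  | cons a l ih =>
    intro h c hc
    by_cases ha : a ∈ altVowels
    · simp [PVfvl, ha] at h
    · simp only [PVfvl, if_neg ha, Option.map_eq_none_iff] at h
      rcases List.mem_cons.mp hc with rfl | hc'
      · exact ha
      · exact ih h c hc' 

lemma fvl_some_decomp : ∀ (l : List Char) (p : Nat), PVfvl l = some p →
    ∃ T v R, l = T ++ v :: R ∧ T.length = p ∧ (∀ c ∈ T, c ∉ altVowels) ∧ v ∈ altVowels := by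
  intro l
  induction l with
  | nil => intro p h; simp [PVfvl] at h
  | cons a l ih =>
    intro p h
    by_cases ha : a ∈ altVowels
    · simp only [PVfvl, if_pos ha] at h
      refine ⟨[], a, l, by simp, by simpa using h, by simp, ha⟩
    · simp only [PVfvl, if_neg ha] at h
      cases hrec : PVfvl l with
      | none => rw [hrec] at h; simp at h
      | some m =>
        rw [hrec] at h
        simp at h
        obtain ⟨T, v, R, hl, hT, hTc, hv⟩ := ih m hrec
        refine ⟨a :: T, v, R, by simp [hl], by simp [hT]; omega, ?_, hv⟩
        intro c hc
        rcases List.mem_cons.mp hc with rfl | hc'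
        · exact ha
        · exact hTc c hc' 

lemma vowel_step (c : Char) (r cur : List Char) (h1 : c ≠ '-') (h2 : c ∈ pvVowels) :
    refA (c :: r) cur false = refA r (cur ++ [c]) true := by
  rw [refA, if_neg h1, if_pos rfl, decide_eq_true h2]

lemma cons_step (c : Char) (r cur : List Char) (h1 : c ≠ '-') (h2 : c ∉ pvVowels) :
    refA (c :: r) cur false = refA r (cur ++ [c]) false := by
  rw [refA, if_neg h1, if_pos rfl, decide_eq_false h2]

lemma vowel_true_step (c : Char) (r cur : List Char) (h1 : c ≠ '-') (h2 : c ∈ pvVowels) :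
    refA (c :: r) cur true = String.ofList cur :: refA r [c] true := by
  rw [refA, if_neg h1, if_neg (by simp), if_pos h2]

lemma cons_true_some (c : Char) (r cur : List Char) (k : Nat) (h1 : c ≠ '-') (h2 : c ∉ pvVowels)
    (hk : PVnvl r = some k) :
    refA (c :: r) cur true =
      if 3 ≤ k + 1 then
        if c ∈ pvNasals ∧ String.ofList (r.take 2) ∈ pvNasalDigraphs then
          String.ofList (cur ++ [c]) :: refA r [] false
        else String.ofList (cur ++ [c] ++ r.take 1) :: refA (r.drop 1) [] false
      else if k + 1 = 2 then
        if String.ofList (c :: r.take 1) ∈ pvDigraphs then String.ofList cur :: refA r [c] false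
        else String.ofList (cur ++ [c]) :: refA r [] false
      else String.ofList cur :: refA r [c] false := by
  rw [refA, if_neg h1, if_neg (by simp), if_neg h2, hk]

lemma endgame (t cur : List Char) (vf : Bool) (ht : okTail t) (hcur : cur ≠ []) :
    refA t cur vf = String.ofList cur :: contT t := by
  rcases ht with rfl | ⟨r, rfl⟩
  · rw [contT, refA, if_pos hcur]
  · rw [contT, refA, if_pos rfl]

lemma SU : ∀ (n : Nat) (seg t : List Char), seg.length ≤ n → (∀ c ∈ seg, c ≠ '-') → okTail t →
    refA (seg ++ t) [] false = altSegSyll seg (decide (t ≠ [])) ++ contT t := by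
  intro n
  induction n with
  | zero =>
    intro seg t hn hs ht
    have hseg : seg = [] := List.length_eq_zero_iff.mp (by omega)
    subst hseg
    rw [segSyll_none [] _ (by unfold altFV; simp)]
    rcases ht with rfl | ⟨r, rfl⟩
    · simp [refA, contT]
    · rw [List.nil_append, refA, if_pos rfl, contT]
      simp
  | succ n ih =>
    intro seg t hn hs ht
    cases hfv : PVfvl seg with
    | none =>
      have hnv : ∀ c ∈ seg, c ∉ pvVowels := fun c hc => fvl_none_mem seg hfv c hc
      have h0 : altFV seg 0 = none := by rw [altFV_eq seg 0]; simp [hfv]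
      rw [segSyll_none seg _ h0]
      rw [phase1 seg t [] (fun c hc => ⟨hnv c hc, hs c hc⟩), List.nil_append]
      rcases ht with rfl | ⟨r, rfl⟩
      · rw [contT]
        by_cases hne : seg = [] <;> simp [refA, hne]
      · rw [contT, refA, if_pos rfl]
        simp
    | some p =>
      obtain ⟨T, v, R, hdec, hTlen, hTnv, hvV⟩ := fvl_some_decomp seg p hfv
      have hvV' : v ∈ pvVowels := hvV
      have hTnv' : ∀ c ∈ T, c ∉ pvVowels := hTnv
      have hp0 : altFV seg 0 = some p := by rw [altFV_eq seg 0]; simp [hfv]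
      have hTd : ∀ c ∈ T, c ≠ '-' := fun c hc => hs c (by rw [hdec]; exact List.mem_append_left _ hc)
      have hvd : v ≠ '-' := hs v (by rw [hdec]; simp)
      have hRd : ∀ c ∈ R, c ≠ '-' := fun c hc => hs c (by rw [hdec]; simp [hc])
      have hRlen : R.length ≤ n := by
        have := hn
        rw [hdec] at this
        simp at this
        omega
      have hphase : refA (seg ++ t) [] false = refA (R ++ t) (T ++ [v]) true := by
        rw [hdec, List.append_assoc, List.cons_append]
        rw [phase1 T (v :: (R ++ t)) [] (fun c hc => ⟨hTnv' c hc, hTd c hc⟩), List.nil_append]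
        rw [vowel_step v _ T hvd hvV']
      rw [hphase]
      have hdropP1 : seg.drop (p + 1) = R := by
        rw [hdec, show T ++ v :: R = (T ++ [v]) ++ R from by simp, List.drop_left' (by simp [hTlen])]
      have htakeP1 : seg.take (p + 1) = T ++ [v] := by
        rw [hdec, show T ++ v :: R = (T ++ [v]) ++ R from by simp, List.take_left' (by simp [hTlen])]
      cases hfv2 : PVfvl R with
      | none =>
        have h1 : altFV seg (p + 1) = none := by rw [altFV_eq seg (p + 1), hdropP1]; simp [hfv2]
        rw [segSyll_one seg _ p hp0 h1]
        have hRnv : ∀ c ∈ R, c ∉ pvVowels := fun c hc => fvl_none_mem R hfv2 c hc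
        rw [phase3 R t (T ++ [v]) ht (fun c hc => ⟨hRnv c hc, hRd c hc⟩)]
        rw [endgame t _ true ht (by simp)]
        rw [hdec]
        simp
      | some j =>
        obtain ⟨G, v2, R2, hRdec, hGlen, hGnv, hv2V⟩ := fvl_some_decomp R j hfv2
        have hv2V' : v2 ∈ pvVowels := hv2V
        have hGnv' : ∀ c ∈ G, c ∉ pvVowels := hGnv
        have hGd : ∀ c ∈ G, c ≠ '-' := fun c hc => hRd c (by rw [hRdec]; exact List.mem_append_left _ hc)
        have hv2d : v2 ≠ '-' := hRd v2 (by rw [hRdec]; simp)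
        have hR2d : ∀ c ∈ R2, c ≠ '-' := fun c hc => hRd c (by rw [hRdec]; simp [hc])
        have hq0 : altFV seg (p + 1) = some (j + (p + 1)) := by
          rw [altFV_eq seg (p + 1), hdropP1]; simp [hfv2]
        rw [segSyll_cut seg _ p (j + (p + 1)) hp0 hq0]
        cases G with
        | nil =>
          -- adjacent vowels: cut right before the second vowel
          have hj : j = 0 := by simpa using hGlen.symm
          have hcut : pvCut seg p (j + (p + 1)) = p + 1 := by
            unfold pvCut
            rw [if_pos (by omega)]
            omega
          simp only [List.nil_append] at hRdec
          rw [hcut, htakeP1, hdropP1, hRdec]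
          rw [hRdec] at hRlen hRd
          rw [List.cons_append, vowel_true_step v2 _ _ hv2d hv2V']
          have hIH := ih (v2 :: R2) t hRlen (fun c hc => hRd c hc) ht
          rw [List.cons_append, vowel_step v2 _ [] hv2d hv2V', List.nil_append] at hIH
          rw [hIH]
          simp
        | cons c G1 =>
          have hcnv : c ∉ pvVowels := hGnv' c (by simp)
          have hcd : c ≠ '-' := hGd c (by simp)
          cases G1 with
          | nil =>
            -- one consonant between vowels: it starts the next syllable
            have hj : j = 1 := by simpa using hGlen.symm
            have hnvl : PVnvl (v2 :: (R2 ++ t)) = some 0 := by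
              simp [PVnvl, hv2V']
            have hstep : refA (R ++ t) (T ++ [v]) true = refA (c :: (v2 :: (R2 ++ t))) (T ++ [v]) true := by
              rw [hRdec]; simp
            rw [hstep, cons_true_some c _ (T ++ [v]) 0 hcd hcnv hnvl]
            rw [if_neg (by omega), if_neg (by omega)]
            have hcut : pvCut seg p (j + (p + 1)) = p + 1 := by
              unfold pvCut
              rw [if_neg (by omega), if_pos (by omega)]
            rw [hcut, htakeP1, hdropP1, hRdec]
            have hIH := ih (c :: v2 :: R2) t (by rw [hRdec] at hRlen; simp at hRlen ⊢; omega)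
              (fun x hx => hRd x (by rw [hRdec]; simp at hx ⊢; tauto)) ht
            rw [List.cons_append, cons_step c _ [] hcd hcnv, List.nil_append] at hIH
            rw [show (v2 :: R2) ++ t = v2 :: (R2 ++ t) from by simp] at hIH
            rw [hIH]
            simp
          | cons d G2 =>
            have hdnv : d ∉ pvVowels := hGnv' d (by simp)
            have hdd : d ≠ '-' := hGd d (by simp)
            cases G2 with
            | nil =>
              -- two consonants: 'ng' goes whole to the next syllable, else split 1-1
              have hj : j = 2 := by simpa using hGlen.symm
              have hnvl : PVnvl (d :: v2 :: (R2 ++ t)) = some 1 := by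
                simp [PVnvl, hdnv, hdd, hv2V']
              have hstep : refA (R ++ t) (T ++ [v]) true = refA (c :: (d :: v2 :: (R2 ++ t))) (T ++ [v]) true := by
                rw [hRdec]; simp
              rw [hstep, cons_true_some c _ (T ++ [v]) 1 hcd hcnv hnvl]
              rw [if_neg (by omega), if_pos (by omega)]
              have htake2 : (seg.drop (p + 1)).take 2 = [c, d] := by
                rw [hdropP1, hRdec]; simp
              have htake1 : (d :: v2 :: (R2 ++ t)).take 1 = [d] := by simp
              rw [htake1]
              by_cases hng : String.ofList [c, d] = "ng"
              · rw [if_pos (show String.ofList (c :: [d]) ∈ pvDigraphs from by simpa [pvDigraphs] using hng)]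
                have hcut : pvCut seg p (j + (p + 1)) = p + 1 := by
                  unfold pvCut
                  rw [if_neg (by omega), if_neg (by omega), if_pos (by omega), htake2, if_pos hng]
                rw [hcut, htakeP1, hdropP1, hRdec]
                have hIH := ih (c :: d :: v2 :: R2) t (by rw [hRdec] at hRlen; simp at hRlen ⊢; omega)
                  (fun x hx => hRd x (by rw [hRdec]; simp at hx ⊢; tauto)) ht
                rw [List.cons_append, cons_step c _ [] hcd hcnv, List.nil_append] at hIH
                rw [show (d :: v2 :: R2) ++ t = d :: v2 :: (R2 ++ t) from by simp] at hIH
                rw [hIH]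
                simp
              · rw [if_neg (show String.ofList (c :: [d]) ∉ pvDigraphs from by simpa [pvDigraphs] using hng)]
                have hcut : pvCut seg p (j + (p + 1)) = p + 2 := by
                  unfold pvCut
                  rw [if_neg (by omega), if_neg (by omega), if_pos (by omega), htake2, if_neg hng]
                have htakeP2 : seg.take (p + 2) = T ++ [v] ++ [c] := by
                  rw [hdec, hRdec, show T ++ v :: ([c, d] ++ v2 :: R2) = (T ++ [v] ++ [c]) ++ (d :: v2 :: R2) from by simp,
                    List.take_left' (by simp [hTlen]; try omega)]
                have hdropP2 : seg.drop (p + 2) = d :: v2 :: R2 := by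
                  rw [hdec, hRdec, show T ++ v :: ([c, d] ++ v2 :: R2) = (T ++ [v] ++ [c]) ++ (d :: v2 :: R2) from by simp,
                    List.drop_left' (by simp [hTlen]; try omega)]
                rw [hcut, htakeP2, hdropP2]
                have hIH := ih (d :: v2 :: R2) t (by rw [hRdec] at hRlen; simp at hRlen ⊢; omega)
                  (fun x hx => hRd x (by rw [hRdec]; simp at hx ⊢; tauto)) ht
                rw [show (d :: v2 :: R2) ++ t = d :: v2 :: (R2 ++ t) from by simp] at hIH
                rw [hIH]
                simp
            | cons e G3 =>
              -- three or more consonants between vowels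
              have hj : j = G3.length + 3 := by simpa using hGlen.symm
              have henv : e ∉ pvVowels := hGnv' e (by simp)
              have hed : e ≠ '-' := hGd e (by simp)
              have hnvl : PVnvl (d :: e :: (G3 ++ v2 :: (R2 ++ t))) = some (G3.length + 2) := by
                have := nvl_some (d :: e :: G3) v2 (R2 ++ t)
                  (fun x hx => ⟨hGnv' x (by simp at hx ⊢; tauto), hGd x (by simp at hx ⊢; tauto)⟩) hv2V'
                simpa using this
              have hstep : refA (R ++ t) (T ++ [v]) true =
                  refA (c :: (d :: e :: (G3 ++ v2 :: (R2 ++ t)))) (T ++ [v]) true := by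
                rw [hRdec]; simp
              rw [hstep, cons_true_some c _ (T ++ [v]) (G3.length + 2) hcd hcnv hnvl]
              rw [if_pos (by omega)]
              have htake2 : (d :: e :: (G3 ++ v2 :: (R2 ++ t))).take 2 = [d, e] := by simp
              have hgetD : seg.getD (p + 1) ' ' = c := by
                rw [List.getD_eq_getElem?_getD, show p + 1 = (p + 1) + 0 from rfl,
                  ← List.getElem?_drop, hdropP1, hRdec]
                simp
              have hdropP2full : seg.drop (p + 2) = d :: e :: (G3 ++ v2 :: R2) := by
                have h1 : seg.drop (p + 2) = (seg.drop (p + 1)).drop 1 := by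
                  rw [List.drop_drop]
                rw [h1, hdropP1, hRdec]
                simp
              have hdropP2take : (seg.drop (p + 2)).take 2 = [d, e] := by
                rw [hdropP2full]; simp
              rw [htake2]
              by_cases hnas : c ∈ pvNasals ∧ String.ofList [d, e] ∈ pvNasalDigraphs
              · rw [if_pos hnas]
                have hcut : pvCut seg p (j + (p + 1)) = p + 2 := by
                  unfold pvCut
                  rw [if_neg (by omega), if_neg (by omega), if_neg (by omega), hgetD, hdropP2take,
                    if_pos (show c ∈ altNasals ∧ String.ofList [d, e] ∈ altNasalDigraphs from hnas)]
                have htakeP2 : seg.take (p + 2) = T ++ [v] ++ [c] := by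
                  rw [hdec, hRdec, show T ++ v :: ((c :: d :: e :: G3) ++ v2 :: R2) = (T ++ [v] ++ [c]) ++ (d :: e :: (G3 ++ v2 :: R2)) from by simp,
                    List.take_left' (by simp [hTlen]; try omega)]
                have hdropP2 : seg.drop (p + 2) = d :: e :: (G3 ++ v2 :: R2) := by
                  rw [hdec, hRdec, show T ++ v :: ((c :: d :: e :: G3) ++ v2 :: R2) = (T ++ [v] ++ [c]) ++ (d :: e :: (G3 ++ v2 :: R2)) from by simp,
                    List.drop_left' (by simp [hTlen]; try omega)]
                rw [hcut, htakeP2, hdropP2]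
                have hIH := ih (d :: e :: (G3 ++ v2 :: R2)) t
                  (by rw [hRdec] at hRlen; simp at hRlen ⊢; omega)
                  (fun x hx => hRd x (by rw [hRdec]; simp at hx ⊢; tauto)) ht
                rw [show (d :: e :: (G3 ++ v2 :: R2)) ++ t = d :: e :: (G3 ++ v2 :: (R2 ++ t)) from by simp] at hIH
                rw [hIH]
                simp
              · rw [if_neg hnas]
                have hcut : pvCut seg p (j + (p + 1)) = p + 3 := by
                  unfold pvCut
                  rw [if_neg (by omega), if_neg (by omega), if_neg (by omega), hgetD, hdropP2take,
                    if_neg (show ¬ (c ∈ altNasals ∧ String.ofList [d, e] ∈ altNasalDigraphs) from hnas)]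
                have htakeP3 : seg.take (p + 3) = T ++ [v] ++ [c] ++ [d] := by
                  rw [hdec, hRdec, show T ++ v :: ((c :: d :: e :: G3) ++ v2 :: R2) = (T ++ [v] ++ [c] ++ [d]) ++ (e :: (G3 ++ v2 :: R2)) from by simp,
                    List.take_left' (by simp [hTlen]; try omega)]
                have hdropP3 : seg.drop (p + 3) = e :: (G3 ++ v2 :: R2) := by
                  rw [hdec, hRdec, show T ++ v :: ((c :: d :: e :: G3) ++ v2 :: R2) = (T ++ [v] ++ [c] ++ [d]) ++ (e :: (G3 ++ v2 :: R2)) from by simp,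
                    List.drop_left' (by simp [hTlen]; try omega)]
                rw [hcut, htakeP3, hdropP3]
                have htk1 : (d :: e :: (G3 ++ v2 :: (R2 ++ t))).take 1 = [d] := by simp
                have hdp1 : (d :: e :: (G3 ++ v2 :: (R2 ++ t))).drop 1 = e :: (G3 ++ v2 :: (R2 ++ t)) := by simp
                rw [htk1, hdp1]
                have hIH := ih (e :: (G3 ++ v2 :: R2)) t
                  (by rw [hRdec] at hRlen; simp at hRlen ⊢; omega)
                  (fun x hx => hRd x (by rw [hRdec]; simp at hx ⊢; tauto)) ht
                rw [show (e :: (G3 ++ v2 :: R2)) ++ t = e :: (G3 ++ v2 :: (R2 ++ t)) from by simp] at hIH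
                rw [hIH]
                simp

lemma go_acc : ∀ (fuel : Nat) (l cur : List Char) (acc : List (List Char)),
    PySem.Chars.splitOn.go ['-'] fuel l cur acc = acc.reverse ++ PySem.Chars.splitOn.go ['-'] fuel l cur [] := by
  intro fuel
  induction fuel with
  | zero => intro l cur acc; simp [PySem.Chars.splitOn.go]
  | succ fuel ih =>
    intro l cur acc
    cases l with
    | nil => simp [PySem.Chars.splitOn.go]
    | cons c rest =>
      rw [PySem.Chars.splitOn.go, PySem.Chars.splitOn.go]
      by_cases hc : List.isPrefixOf ['-'] (c :: rest) = true
      · rw [if_pos hc, if_pos hc]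
        rw [ih _ [] (cur.reverse :: acc), ih _ [] [cur.reverse]]
        simp
      · rw [if_neg hc, if_neg hc]
        rw [ih rest (c :: cur) acc]

lemma go_nosep : ∀ (fuel : Nat) (l cur : List Char), l.length ≤ fuel → '-' ∉ l →
    PySem.Chars.splitOn.go ['-'] fuel l cur [] = [cur.reverse ++ l] := by
  intro fuel
  induction fuel with
  | zero =>
    intro l cur hl _
    interval_cases hl' : l.length
    · rw [List.length_eq_zero_iff.mp hl']
      simp [PySem.Chars.splitOn.go]
  | succ fuel ih =>
    intro l cur hl hm
    cases l with
    | nil => simp [PySem.Chars.splitOn.go]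
    | cons c rest =>
      rw [PySem.Chars.splitOn.go]
      have hc : c ≠ '-' := fun h => hm (by simp [h])
      have hpre : List.isPrefixOf ['-'] (c :: rest) = false := by
        simp [List.isPrefixOf]
        exact fun h => absurd h.symm hc
      rw [hpre]
      simp only [Bool.false_eq_true, if_false]
      rw [ih rest (c :: cur) (by simpa using hl) (fun h => hm (by simp [h]))]
      simp

lemma go_sep : ∀ (seg : List Char) (fuel : Nat) (rest cur : List Char), seg.length + 1 ≤ fuel → '-' ∉ seg →
    PySem.Chars.splitOn.go ['-'] fuel (seg ++ '-' :: rest) cur [] =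
      (cur.reverse ++ seg) :: PySem.Chars.splitOn.go ['-'] (fuel - seg.length - 1) rest [] [] := by
  intro seg
  induction seg with
  | nil =>
    intro fuel rest cur hf _
    match fuel, hf with
    | fuel + 1, _ =>
      rw [List.nil_append, PySem.Chars.splitOn.go]
      have hpre : List.isPrefixOf ['-'] ('-' :: rest) = true := by simp [List.isPrefixOf]
      rw [if_pos hpre]
      rw [go_acc fuel _ [] [cur.reverse]]
      simp
  | cons c seg ih =>
    intro fuel rest cur hf hm
    match fuel, hf with
    | fuel + 1, hf =>
      rw [List.cons_append, PySem.Chars.splitOn.go]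
      have hc : c ≠ '-' := fun h => hm (by simp [h])
      have hpre : List.isPrefixOf ['-'] (c :: (seg ++ '-' :: rest)) = false := by
        simp [List.isPrefixOf]
        exact fun h => absurd h.symm hc
      rw [hpre]
      simp only [Bool.false_eq_true, if_false]
      rw [ih fuel rest (c :: cur) (by simpa using hf) (fun h => hm (by simp [h]))]
      have harith : fuel + 1 - (seg.length + 1) - 1 = fuel - seg.length - 1 := by omega
      simp only [List.reverse_cons, List.length_cons, harith]
      simp

lemma split_nosep (l : List Char) (h : '-' ∉ l) : PySem.Chars.splitOn l ['-'] = [l] := by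
  unfold PySem.Chars.splitOn
  rw [go_nosep (l.length + 1) l [] (by omega) h]
  simp

lemma split_cons (seg rest : List Char) (h : '-' ∉ seg) :
    PySem.Chars.splitOn (seg ++ '-' :: rest) ['-'] = seg :: PySem.Chars.splitOn rest ['-'] := by
  unfold PySem.Chars.splitOn
  rw [go_sep seg ((seg ++ '-' :: rest).length + 1) rest [] (by simp) h]
  have hlen : (seg ++ '-' :: rest).length + 1 - seg.length - 1 = rest.length + 1 := by
    simp
    omega
  rw [hlen]
  simp

lemma hyphen_decomp : ∀ (w : List Char), '-' ∈ w → ∃ T rest, w = T ++ '-' :: rest ∧ '-' ∉ T := by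
  intro w
  induction w with
  | nil => intro h; simp at h
  | cons c w ih =>
    intro h
    by_cases hc : c = '-'
    · exact ⟨[], w, by simp [hc], by simp⟩
    · have hw : '-' ∈ w := by
        rcases List.mem_cons.mp h with h' | h'
        · exact absurd h'.symm hc
        · exact h'
      obtain ⟨T, rest, hdec, hT⟩ := ih hw
      exact ⟨c :: T, rest, by simp [hdec], by simp [hT]; exact fun h' => hc h'.symm⟩

lemma splitOn_ne_nil (l : List Char) : PySem.Chars.splitOn l ['-'] ≠ [] := by
  by_cases h : '-' ∈ l
  · obtain ⟨T, rest, rfl, hT⟩ := hyphen_decomp l h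
    rw [split_cons T rest hT]
    simp
  · rw [split_nosep l h]
    simp

lemma TOP : ∀ (n : Nat) (w : List Char), w.length ≤ n →
    refA w [] false = recJoin (PySem.Chars.splitOn w ['-']) := by
  intro n
  induction n with
  | zero =>
    intro w hw
    have hw0 : w = [] := List.length_eq_zero_iff.mp (by omega)
    subst hw0
    rw [split_nosep [] (by simp)]
    rw [recJoin, recJoin, refA]
    rw [segSyll_none [] _ (by unfold altFV; simp)]
    simp
  | succ n ih =>
    intro w hw
    by_cases h : '-' ∈ w
    · obtain ⟨T, rest, rfl, hT⟩ := hyphen_decomp w h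
      rw [split_cons T rest hT]
      rw [SU (T.length) T ('-' :: rest) le_rfl (fun c hc h' => hT (h' ▸ hc)) (Or.inr ⟨rest, rfl⟩)]
      rw [recJoin]
      rw [decide_eq_true (by simp : ('-' :: rest : List Char) ≠ [])]
      rw [decide_eq_true (splitOn_ne_nil rest)]
      rw [contT]
      rw [ih rest (by simp at hw; omega)]
    · rw [split_nosep w h]
      have := SU w.length w [] le_rfl (fun c hc h' => h (h' ▸ hc)) (Or.inl rfl)
      rw [List.append_nil] at this
      rw [this, recJoin, recJoin, contT]
      simp

lemma fold_bridge (N : Nat) : ∀ (ss : List (List Char)) (i : Nat) (acc : List String), i + ss.length = N →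
    (ss.foldl (fun (st : Nat × List String) seg =>
        (st.1 + 1, st.2 ++ altSegSyll seg (decide (st.1 < N - 1)))) (i, acc)).2 = acc ++ recJoin ss := by
  intro ss
  induction ss with
  | nil => intro i acc _; simp [recJoin]
  | cons s ss ih =>
    intro i acc hN
    rw [List.foldl_cons]
    rw [ih (i + 1) _ (by simp at hN ⊢; omega)]
    rw [recJoin]
    have hflag : decide (i < N - 1) = decide (ss ≠ []) := by
      apply decide_eq_decide.mpr
      constructor
      · intro hlt hnil
        rw [hnil] at hN
        simp at hN
        omega
      · intro hne
        have : 0 < ss.length := List.length_pos_iff.mpr hne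
        simp at hN
        omega
    rw [hflag]
    simp


-- ===== VERDICT (by name: the statement is the Claim_ definition above) =====
theorem word2syll_tgl_spec : Claim_equal_word2syll_tgl := by
  intro word _
  unfold Spec_word2syll_tgl word2syll_tgl word2syll_tgl_alt
  rw [loopA_refA word.toList (word.toList.length + 1) 0 [] [] false (by omega)]
  rw [List.drop_zero, List.nil_append]
  rw [TOP word.toList.length word.toList le_rfl]
  rw [fold_bridge (PySem.Chars.splitOn word.toList ['-']).length _ 0 [] (by omega)]
  rw [List.nil_append]
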